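-- pv_equiv track=rewrite | github.com/aodiwei/data_structures_algorithms | algorithms.py | binfind_last_le
-- ===== SOURCE A (Python) =====
-- def binfind_last_le(arr, n):
--     """
--     二分法查找最后一个小于等于n, 有重复数据
--     :param arr:
--     :param n:
--     :return:
--     """
--     size = len(arr)
--     low = 0
--     high = size - 1
--     while low <= high:
--         mid = low + (high - low) // 2  # (low + high) // 2
--         if arr[mid] <= n:
--             if (mid == size - 1 or arr[mid + 1] > n):
--                 return mid
--             else:
--                 low = mid + 1
--         else:  # arr[mid] > n:
--             high = mid - 1
--
--     return None
-- ===== SOURCE B (Python) =====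
-- def binfind_last_le(arr, n):
--     """Same search, recursing on (start, span-count) of the window instead of iterating on low/high."""
--     size = len(arr)
--
--     def rec(low, span):
--         if span == 0:
--             return None
--         half = (span - 1) // 2
--         mid = low + half
--         if arr[mid] > n:
--             return rec(low, half)
--         if mid + 1 < size and arr[mid + 1] <= n:
--             return rec(mid + 1, span - half - 1)
--         return mid
--
--     return rec(0, size)
-- ===== Notes on version B (the rewrite author's own statement) =====
-- stated objective: alternative
-- what changed: A's iterative while-loop mutating inclusive bounds low/high is replaced by a recursive helper rec(low, span) over the window's start and element count: span==0 is the empty case, half=(span-1)//2 gives the midpoint offset, and the left/right branches recurse on counts half and span-half-1 instead of moving the high/low bounds.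
import Mathlib
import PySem

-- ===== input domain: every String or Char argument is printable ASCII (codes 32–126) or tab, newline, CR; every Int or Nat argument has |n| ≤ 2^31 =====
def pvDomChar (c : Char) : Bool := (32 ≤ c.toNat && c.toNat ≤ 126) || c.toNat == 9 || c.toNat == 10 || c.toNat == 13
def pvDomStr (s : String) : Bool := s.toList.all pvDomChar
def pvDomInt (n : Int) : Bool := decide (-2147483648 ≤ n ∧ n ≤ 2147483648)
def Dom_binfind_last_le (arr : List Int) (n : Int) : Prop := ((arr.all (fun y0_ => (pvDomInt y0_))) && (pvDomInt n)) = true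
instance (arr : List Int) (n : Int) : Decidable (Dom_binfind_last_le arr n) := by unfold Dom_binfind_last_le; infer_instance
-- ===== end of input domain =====

-- B replaces A's iterative while-loop on inclusive bounds (low, high) by a recursion on the
-- window's start and element count (low, span); same comparisons, same result, no speed claim.

-- ===== PORT A =====
-- A's while-loop as a recursive function over the mutable state (low, high); size = len(arr).
-- arr[mid] / arr[mid+1] are ported with pyGetD: every index the loop reads satisfies
-- 0 ≤ low ≤ mid ≤ high ≤ size-1 (and mid+1 is only read when mid ≠ size-1), so Python never raises.
def binfind_loop (arr : List Int) (n size low high : Int) : Option Int :=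
  if _h : low ≤ high then
    if PySem.List.pyGetD arr (low + PySem.Int.floordiv (high - low) 2) 0 ≤ n then
      if low + PySem.Int.floordiv (high - low) 2 = size - 1 ∨
          PySem.List.pyGetD arr (low + PySem.Int.floordiv (high - low) 2 + 1) 0 > n then
        some (low + PySem.Int.floordiv (high - low) 2)
      else
        binfind_loop arr n size (low + PySem.Int.floordiv (high - low) 2 + 1) high
    else
      binfind_loop arr n size low (low + PySem.Int.floordiv (high - low) 2 - 1)
  else none
termination_by (high - low + 1).toNat
decreasing_by
  all_goals
    have hfd : PySem.Int.floordiv (high - low) 2 = (high - low) / 2 :=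
      PySem.Int.floordiv_eq_ediv_of_pos (by omega)
    rw [hfd] at *
    omega

def binfind_last_le (arr : List Int) (n : Int) : Option Int :=
  binfind_loop arr n (arr.length : Int) 0 ((arr.length : Int) - 1)

-- ===== PORT B =====
-- B's inner helper rec(low, span); span counts the elements of the current window,
-- half = (span-1)//2 is ported with PySem floordiv.  The stopping guard is span ≤ 0 rather
-- than Source B's span == 0 only to make the recursion total on all Int states; from the entry
-- point span = len(arr) ≥ 0 and stays ≥ 0, so the two guards coincide on every reached state.
-- Source B's short-circuit 'mid + 1 < size and arr[mid + 1] <= n' is ported as the two nested ifs.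
def binfind_recB (arr : List Int) (n size low span : Int) : Option Int :=
  if _h : span ≤ 0 then none
  else
    if PySem.List.pyGetD arr (low + PySem.Int.floordiv (span - 1) 2) 0 > n then
      binfind_recB arr n size low (PySem.Int.floordiv (span - 1) 2)
    else if low + PySem.Int.floordiv (span - 1) 2 + 1 < size then
      if PySem.List.pyGetD arr (low + PySem.Int.floordiv (span - 1) 2 + 1) 0 ≤ n then
        binfind_recB arr n size (low + PySem.Int.floordiv (span - 1) 2 + 1)
          (span - PySem.Int.floordiv (span - 1) 2 - 1)
      else some (low + PySem.Int.floordiv (span - 1) 2)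
    else some (low + PySem.Int.floordiv (span - 1) 2)
termination_by span.toNat
decreasing_by
  all_goals
    have hfd : PySem.Int.floordiv (span - 1) 2 = (span - 1) / 2 :=
      PySem.Int.floordiv_eq_ediv_of_pos (by omega)
    rw [hfd] at *
    omega

def binfind_last_le_alt (arr : List Int) (n : Int) : Option Int :=
  binfind_recB arr n (arr.length : Int) 0 (arr.length : Int)

-- ===== PRECONDITION & SPEC =====
def Spec_binfind_last_le (arr : List Int) (n : Int) (out : Option Int) : Prop := out = binfind_last_le_alt arr n
instance (arr : List Int) (n : Int) (out : Option Int) : Decidable (Spec_binfind_last_le arr n out) := by unfold Spec_binfind_last_le; infer_instance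

-- ===== CLAIM (what is proved, stated in full; the proofs are below) =====
def Claim_equal_binfind_last_le : Prop := ∀ (arr : List Int) (n : Int), Dom_binfind_last_le arr n → Spec_binfind_last_le arr n (binfind_last_le arr n)

-- ===== LEMMAS AND PROOFS =====

-- Core equivalence: A's loop on inclusive bounds (low, high) equals B's recursion on the
-- element count high - low + 1, whenever high ≤ size - 1 (invariant of both searches).
lemma loop_eq_recB (arr : List Int) (n size : Int) :
    ∀ (k : Nat) (low high : Int), (high - low + 1).toNat ≤ k → high ≤ size - 1 →
      binfind_loop arr n size low high = binfind_recB arr n size low (high - low + 1) := by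
  intro k
  induction k with
  | zero =>
    intro low high hk hhs
    rw [binfind_loop, binfind_recB]
    have h1 : ¬ low ≤ high := by omega
    have h2 : high - low + 1 ≤ 0 := by omega
    simp [h1, h2]
  | succ k ih =>
    intro low high hk hhs
    rw [binfind_loop, binfind_recB]
    by_cases hlh : low ≤ high
    · have hg : ¬ high - low + 1 ≤ 0 := by omega
      have hfdA : PySem.Int.floordiv (high - low) 2 = (high - low) / 2 :=
        PySem.Int.floordiv_eq_ediv_of_pos (by omega)
      have hfdB : PySem.Int.floordiv (high - low + 1 - 1) 2 = (high - low + 1 - 1) / 2 :=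
        PySem.Int.floordiv_eq_ediv_of_pos (by omega)
      have hmid : low + PySem.Int.floordiv (high - low + 1 - 1) 2 =
          low + PySem.Int.floordiv (high - low) 2 := by rw [hfdA, hfdB]; omega
      rw [hmid]
      set mid := low + PySem.Int.floordiv (high - low) 2 with hmiddef
      have hmb : low ≤ mid ∧ mid ≤ high := by rw [hmiddef, hfdA]; omega
      by_cases hv : PySem.List.pyGetD arr mid 0 ≤ n
      · have hv' : ¬ PySem.List.pyGetD arr mid 0 > n := by omega
        by_cases hret : mid = size - 1 ∨ PySem.List.pyGetD arr (mid + 1) 0 > n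
        · by_cases hlt : mid + 1 < size
          · have hnr : ¬ PySem.List.pyGetD arr (mid + 1) 0 ≤ n := by
              rcases hret with h | h <;> omega
            simp [hlh, hg, hv, hv', hret, hlt, hnr]
          · simp [hlh, hg, hv, hv', hret, hlt]
        · push Not at hret
          have hlt : mid + 1 < size := by omega
          have hle : PySem.List.pyGetD arr (mid + 1) 0 ≤ n := by omega
          have hret' : ¬ (mid = size - 1 ∨ PySem.List.pyGetD arr (mid + 1) 0 > n) := by
            rintro (h | h) <;> omega
          simp only [dif_pos hlh, dif_neg hg, if_pos hv, if_neg hret', if_neg hv',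
            if_pos hlt, if_pos hle]
          have hspan : high - low + 1 - PySem.Int.floordiv (high - low + 1 - 1) 2 - 1 =
              high - (mid + 1) + 1 := by rw [hfdB, hmiddef, hfdA]; omega
          rw [hspan]
          exact ih (mid + 1) high (by rw [hmiddef, hfdA] at *; omega) hhs
      · have hv' : PySem.List.pyGetD arr mid 0 > n := by omega
        simp only [dif_pos hlh, dif_neg hg, if_neg hv, if_pos hv']
        have hspan : PySem.Int.floordiv (high - low + 1 - 1) 2 = (mid - 1) - low + 1 := by
          rw [hfdB, hmiddef, hfdA]; omega
        rw [hspan]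
        exact ih low (mid - 1) (by rw [hmiddef, hfdA] at *; omega) (by omega)
    · have h2 : high - low + 1 ≤ 0 := by omega
      simp [hlh, h2]

-- ===== VERDICT (by name: the statement is the Claim_ definition above) =====
theorem binfind_last_le_spec : Claim_equal_binfind_last_le := by
  intro arr n _
  unfold Spec_binfind_last_le binfind_last_le binfind_last_le_alt
  have := loop_eq_recB arr n (arr.length : Int) (arr.length + 1) 0 ((arr.length : Int) - 1)
    (by omega) (by omega)
  rw [this]
  congr 1
  omega
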